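-- pv_equiv track=rewrite | github.com/NateSolon/chess_diagram | utils.py | _trans_rank
-- ===== SOURCE A (Python) =====
-- def _trans_rank(rank):
--     new_rank = ''
--     empty_counter = 0
--     for ch in rank:
--         if ch == '_':
--             empty_counter+=1
--         else:
--             if empty_counter>0:
--                 new_rank += str(empty_counter)
--                 empty_counter = 0
--             new_rank += ch
--     if empty_counter > 0:
--         new_rank += str(empty_counter)
--     return new_rank
-- ===== SOURCE B (Python) =====
-- def _trans_rank(rank):
--     parts = []
--     i, n = 0, len(rank)
--     while i < n:
--         j = i
--         while j < n and rank[j] == rank[i]: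
--             j += 1
--         parts.append(str(j - i) if rank[i] == '_' else rank[i:j])
--         i = j
--     return ''.join(parts)
-- ===== Notes on version B (the rewrite author's own statement) =====
-- stated objective: alternative
-- what changed: Replaces the char-by-char fold with a running counter and end-of-loop flush by a groupby-style two-pointer scan that emits each maximal run at once (count for '_' runs, slice for others) and joins the pieces.
import Mathlib
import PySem

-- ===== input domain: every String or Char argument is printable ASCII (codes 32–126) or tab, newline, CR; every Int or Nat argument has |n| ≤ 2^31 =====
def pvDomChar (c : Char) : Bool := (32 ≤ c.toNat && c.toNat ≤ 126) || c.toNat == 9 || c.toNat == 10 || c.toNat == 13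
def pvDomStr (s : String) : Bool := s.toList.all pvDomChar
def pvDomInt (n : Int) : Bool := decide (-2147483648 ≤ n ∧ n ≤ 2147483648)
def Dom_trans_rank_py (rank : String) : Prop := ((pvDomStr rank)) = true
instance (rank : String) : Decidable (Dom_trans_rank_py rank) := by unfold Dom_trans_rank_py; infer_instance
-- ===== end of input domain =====

-- B replaces A's running-counter fold (with end-of-loop flush) by a groupby-style
-- run scan that emits each maximal run at once; objective: alternative (same cost).

-- ===== PORT A =====
-- loop state: (new_rank, empty_counter)
def transRankStepA (st : List Char × Int) (ch : Char) : List Char × Int :=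
  if ch == '_' then (st.1, st.2 + 1)
  else
    let acc := if st.2 > 0 then st.1 ++ PySem.Int.toChars st.2 else st.1
    (acc ++ [ch], 0)

def trans_rank_py (rank : String) : String :=
  let st := rank.toList.foldl transRankStepA ([], 0)
  String.ofList (if st.2 > 0 then st.1 ++ PySem.Int.toChars st.2 else st.1)

-- ===== PORT B =====
-- each step consumes one maximal run rank[i:j] (inner j-scan = takeWhile)
def transRankRunsB : List Char → List Char
  | [] => []
  | c :: rest =>
    let run := rest.takeWhile (· == c)
    let piece := if c == '_' then PySem.Int.toChars ((run.length : Int) + 1) else c :: run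
    piece ++ transRankRunsB (rest.dropWhile (· == c))
termination_by cs => cs.length
decreasing_by
  simpa using Nat.lt_succ_of_le (List.length_dropWhile_le (· == c) rest)

def trans_rank_py_alt (rank : String) : String :=
  String.ofList (transRankRunsB rank.toList)

-- ===== PRECONDITION & SPEC =====
def Spec_trans_rank_py (rank : String) (out : String) : Prop := out = trans_rank_py_alt rank
instance (rank : String) (out : String) : Decidable (Spec_trans_rank_py rank out) := by unfold Spec_trans_rank_py; infer_instance

-- ===== CLAIM (what is proved, stated in full; the proofs are below) =====
def Claim_equal_trans_rank_py : Prop := ∀ (rank : String), Dom_trans_rank_py rank → Spec_trans_rank_py rank (trans_rank_py rank)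

-- ===== LEMMAS AND PROOFS =====

-- final flush of A's loop state
def transRankFinish (st : List Char × Int) : List Char :=
  if st.2 > 0 then st.1 ++ PySem.Int.toChars st.2 else st.1

theorem foldl_stepA_no_underscore (l : List Char) (h : ∀ c ∈ l, ¬ c = '_') (a : List Char) :
    l.foldl transRankStepA (a, 0) = (a ++ l, 0) := by
  induction l generalizing a with
  | nil => simp
  | cons c t ih =>
    have hc : ¬ c = '_' := h c (by simp)
    simp only [List.foldl_cons, transRankStepA, beq_iff_eq, if_neg hc]
    rw [ih (fun d hd => h d (by simp [hd]))]
    simp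

theorem foldl_stepA_all_underscore (l : List Char) (h : ∀ c ∈ l, c = '_') (a : List Char) (k : Int) :
    l.foldl transRankStepA (a, k) = (a, k + l.length) := by
  induction l generalizing k with
  | nil => simp
  | cons c t ih =>
    have hc : c = '_' := h c (by simp)
    simp only [List.foldl_cons, transRankStepA, beq_iff_eq, if_pos hc]
    rw [ih (fun d hd => h d (by simp [hd]))]
    simp; ring

theorem transRank_main (n : Nat) : ∀ cs : List Char, cs.length ≤ n → ∀ a : List Char,
    transRankFinish (cs.foldl transRankStepA (a, 0)) = a ++ transRankRunsB cs := by
  induction n with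
  | zero =>
    intro cs hl a
    have : cs = [] := List.eq_nil_of_length_eq_zero (Nat.le_zero.mp hl)
    subst this
    simp [transRankRunsB, transRankFinish]
  | succ n ih =>
    intro cs hl a
    match cs with
    | [] => simp [transRankRunsB, transRankFinish]
    | c :: rest =>
      have hsplit : rest.takeWhile (· == c) ++ rest.dropWhile (· == c) = rest :=
        List.takeWhile_append_dropWhile
      set run := rest.takeWhile (· == c) with hrun
      set rst := rest.dropWhile (· == c) with hrst
      have hdroplen : rst.length ≤ n := by
        have h1 : rst.length ≤ rest.length := List.length_dropWhile_le _ _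
        have h2 : rest.length + 1 ≤ n + 1 := by simpa using hl
        omega
      have hruneq : ∀ d ∈ run, d = c := by
        intro d hd
        have := List.mem_takeWhile_imp hd
        simpa using this
      by_cases hc : c = '_'
      · -- underscore run
        subst hc
        have hrunU : ∀ d ∈ run, d = '_' := hruneq
        have hfold : ('_' :: rest).foldl transRankStepA (a, 0)
            = rst.foldl transRankStepA (a, (run.length : Int) + 1) := by
          conv_lhs => rw [show '_' :: rest = ('_' :: run) ++ rst by rw [List.cons_append, hsplit]]
          rw [List.foldl_append]
          rw [foldl_stepA_all_underscore ('_' :: run) (by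
            intro d hd
            rcases List.mem_cons.mp hd with h | h
            · exact h
            · exact hrunU d h) a 0]
          simp [add_comm]
        have hK : (0:Int) < (run.length : Int) + 1 := by positivity
        have hgoalB : transRankRunsB ('_' :: rest)
            = PySem.Int.toChars ((run.length : Int) + 1) ++ transRankRunsB rst := by
          rw [transRankRunsB]
          simp [← hrun, ← hrst]
        match hrstE : rst with
        | [] =>
          rw [hfold]
          simp only [List.foldl_nil, transRankFinish, hK]
          rw [hgoalB]; simp [transRankRunsB]
        | d :: ds =>
          have hd : ¬ d = '_' := by
            have h0 := List.head_dropWhile_not (· == '_') (l := rest)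
            rw [← hrst] at h0
            have := h0 (by simp)
            simpa using this
          have hshift : (d :: ds).foldl transRankStepA (a, (run.length : Int) + 1)
              = (d :: ds).foldl transRankStepA (a ++ PySem.Int.toChars ((run.length : Int) + 1), 0) := by
            simp only [List.foldl_cons, transRankStepA, beq_iff_eq, if_neg hd, gt_iff_lt,
              if_pos hK]
            simp
          rw [hfold, hshift, ih (d :: ds) hdroplen _]
          rw [hgoalB, List.append_assoc]
      · -- non-underscore run
        have hfold : (c :: rest).foldl transRankStepA (a, 0)
            = rst.foldl transRankStepA (a ++ (c :: run), 0) := by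
          conv_lhs => rw [show c :: rest = (c :: run) ++ rst by rw [List.cons_append, hsplit]]
          rw [List.foldl_append]
          rw [foldl_stepA_no_underscore (c :: run) (by
            intro d hd
            rcases List.mem_cons.mp hd with h | h
            · exact h ▸ hc
            · exact (hruneq d h) ▸ hc) a]
        rw [hfold, ih rst hdroplen _]
        rw [transRankRunsB]
        simp [← hrun, ← hrst, hc]

-- ===== VERDICT (by name: the statement is the Claim_ definition above) =====
theorem trans_rank_py_spec : Claim_equal_trans_rank_py := by
  intro rank _
  unfold Spec_trans_rank_py trans_rank_py trans_rank_py_alt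
  have := transRank_main rank.toList.length rank.toList le_rfl []
  simp only [transRankFinish] at this
  simp [this]
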